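-- pv_equiv track=rewrite | github.com/walterleonardo/python_useful_scripts | replaceStrings.py | replace_string
-- ===== SOURCE A (Python) =====
-- def replace_string(string):
--     if len(string) <= 1:
--         return string
--
--     if string[:2] == "aa":
--         string = "b" + replace_string(string[2:])
--     elif string[:2] == "bb":
--         string = "c" + replace_string(string[2:])
--     else:
--         string = string[0] + replace_string(string[1:])
--
--     return string
-- ===== SOURCE B (Python) =====
-- def replace_string(string):
--     # Run-length view: within a maximal run of k equal chars, greedy non-cascading
--     # pairing turns 'a'*k into 'b'*(k//2)+'a'*(k%2), 'b'*k into 'c'*(k//2)+'b'*(k%2),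
--     # and leaves any other run unchanged; pairs never cross run boundaries.
--     parts = []
--     i = 0
--     n = len(string)
--     while i < n:
--         ch = string[i]
--         j = i
--         while j < n and string[j] == ch:
--             j += 1
--         k = j - i
--         if ch == 'a':
--             parts.append('b' * (k // 2) + 'a' * (k % 2))
--         elif ch == 'b':
--             parts.append('c' * (k // 2) + 'b' * (k % 2))
--         else:
--             parts.append(ch * k)
--         i = j
--     return ''.join(parts)
-- ===== Notes on version B (the rewrite author's own statement) =====
-- stated objective: alternative
-- what changed: Replaced the per-pair recursion, which re-slices the tail string at every step, by a run-length scan: each maximal run of k equal characters is rewritten in one step using k//2 replacement characters plus a parity leftover, since pairs never cross run boundaries.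
import Mathlib
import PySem

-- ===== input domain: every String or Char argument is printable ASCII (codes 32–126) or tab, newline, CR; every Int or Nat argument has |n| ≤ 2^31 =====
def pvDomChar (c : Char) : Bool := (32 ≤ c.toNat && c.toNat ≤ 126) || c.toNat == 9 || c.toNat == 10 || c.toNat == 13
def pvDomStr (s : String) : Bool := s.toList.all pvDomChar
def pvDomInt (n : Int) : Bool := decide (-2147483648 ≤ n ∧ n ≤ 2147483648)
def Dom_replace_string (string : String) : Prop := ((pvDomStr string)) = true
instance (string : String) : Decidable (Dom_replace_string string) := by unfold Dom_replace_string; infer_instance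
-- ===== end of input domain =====

-- B replaces A's per-pair recursion by run-length grouping (each maximal run of equal
-- characters is rewritten in one step with division by 2); objective: alternative.

-- ===== PORT A =====
-- A's recursion, char-exact: len ≤ 1 → unchanged; "aa" prefix → 'b' ++ rec(drop 2);
-- "bb" → 'c' ++ rec(drop 2); else keep head, rec(drop 1).
def repA : List Char → List Char
  | [] => []
  | [c] => [c]
  | a :: b :: rest =>
    if a == 'a' && b == 'a' then 'b' :: repA rest
    else if a == 'b' && b == 'b' then 'c' :: repA rest
    else a :: repA (b :: rest)

def replace_string (string : String) : String :=
  String.mk (repA string.toList)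

-- ===== PORT B =====
-- B's inner while loop measures the maximal run of the current char; emitB is the
-- body of B's if/elif/else (k//2 replacement chars plus a parity leftover); repRuns is the outer loop.
def emitB (ch : Char) (k : Nat) : List Char :=
  if ch == 'a' then List.replicate (k / 2) 'b' ++ List.replicate (k % 2) 'a'
  else if ch == 'b' then List.replicate (k / 2) 'c' ++ List.replicate (k % 2) 'b'
  else List.replicate k ch

def repRuns : List Char → List Char
  | [] => []
  | c :: rest =>
    emitB c ((rest.takeWhile (· == c)).length + 1) ++ repRuns (rest.dropWhile (· == c))
termination_by l => l.length
decreasing_by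
  simp only [List.length_cons]
  exact Nat.lt_succ_of_le (List.length_dropWhile_le _ _)

def replace_string_alt (string : String) : String :=
  String.mk (repRuns string.toList)

-- ===== PRECONDITION & SPEC =====
def Spec_replace_string (string : String) (out : String) : Prop := out = replace_string_alt string
instance (string : String) (out : String) : Decidable (Spec_replace_string string out) := by unfold Spec_replace_string; infer_instance

-- ===== CLAIM (what is proved, stated in full; the proofs are below) =====
def Claim_equal_replace_string : Prop := ∀ (string : String), Dom_replace_string string → Spec_replace_string string (replace_string string)

-- ===== LEMMAS AND PROOFS =====

-- A on a maximal run: pairs are consumed inside the run only.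
theorem repA_run (c : Char) (k : Nat) (t : List Char) (h : t.head? ≠ some c) :
    repA (List.replicate k c ++ t) = emitB c k ++ repA t := by
  induction k using Nat.strong_induction_on with
  | _ k ih =>
    match k with
    | 0 => simp [emitB]
    | 1 =>
      match t, h with
      | [], _ => simp [repA, emitB]; split_ifs <;> simp_all
      | d :: t', h =>
        simp only [List.head?] at h
        have hd : d ≠ c := fun e => h (by rw [e])
        simp only [List.replicate, List.nil_append, List.cons_append, repA, emitB]
        split_ifs with h1 h2 <;> simp_all
    | k + 2 =>
      have step : List.replicate (k + 2) c ++ t = c :: c :: (List.replicate k c ++ t) := by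
        simp [List.replicate]
      rw [step, repA]
      by_cases hca : c = 'a'
      · subst hca
        simp only [beq_self_eq_true, Bool.and_self, if_true]
        rw [ih k (by omega) ]
        simp [emitB, List.replicate]
      · by_cases hcb : c = 'b'
        · subst hcb
          simp only [emitB]
          norm_num
          rw [ih k (by omega)]
          simp [emitB, List.replicate]
        · have h1 : (c == 'a') = false := by simp [hca]
          have h2 : (c == 'b') = false := by simp [hcb]
          simp only [h1, Bool.false_and, Bool.false_eq_true, if_false, h2]
          rw [show (c :: (List.replicate k c ++ t)) = List.replicate (k+1) c ++ t from by
                simp [List.replicate_succ],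
              ih (k+1) (by omega)]
          simp [emitB, h1, h2, List.replicate]

theorem repA_eq_repRuns (l : List Char) : repA l = repRuns l := by
  induction l using repRuns.induct with
  | case1 => simp [repA, repRuns]
  | case2 c rest ih =>
    rw [repRuns]
    have hsplit : c :: rest
        = List.replicate ((rest.takeWhile (· == c)).length + 1) c ++ rest.dropWhile (· == c) := by
      conv_lhs => rw [← List.takeWhile_append_dropWhile (p := (· == c)) (l := rest)]
      have : rest.takeWhile (· == c) = List.replicate ((rest.takeWhile (· == c)).length) c := by
        apply List.eq_replicate_length.mpr
        intro x hx
        have := List.mem_takeWhile_imp hx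
        simpa using this
      rw [List.replicate_succ, List.cons_append]
      congr 1
      conv_lhs => rw [this]
    have hhead : (rest.dropWhile (· == c)).head? ≠ some c := by
      intro hc
      have := List.head?_dropWhile_not (p := (· == c)) (l := rest)
      rw [hc] at this
      simp at this
    conv_lhs => rw [hsplit]
    rw [repA_run c _ _ hhead, ih]

-- ===== VERDICT (by name: the statement is the Claim_ definition above) =====
theorem replace_string_spec : Claim_equal_replace_string := by
  intro s _
  unfold Spec_replace_string replace_string replace_string_alt
  rw [repA_eq_repRuns]
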